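-- pv_equiv track=rewrite | github.com/LeoHink/PubGProject | observations.py | get_match_indices_dict
-- ===== SOURCE A (Python) =====
-- import collections
--
-- def get_match_indices_dict(dict, cheaters = False, cheaters_list = None):
--     """
--     a function that takes a dictionary with key "match" and returns a dictionary where each
--     key is a match and the values are the indices of the match in the dictionary. Can also be used
--     to get matches where cheating players are involved. If cheaters is set to True, and cheaters_list
--     is supplied.
--     """
--     if cheaters == False:
--         matches = collections.defaultdict(list)
--         for index, value in enumerate(dict["match"]):
--             matches[value].append(index)
--         return matches
--     else:
--         if type(cheaters_list) != set:
--             cheaters_list = set(cheaters_list)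
--         matches = collections.defaultdict(list)
--         cheating_matches = set()
--         for index, user in enumerate(dict["killer"]):
--             if user in cheaters_list:
--                 cheating_matches.add(dict["match"][index])
--         for index, match in enumerate(dict["match"]):
--             if match in cheating_matches:
--                 matches[match].append(index)
--         return matches
-- ===== SOURCE B (Python) =====
-- import collections
--
-- def get_match_indices_dict(dict, cheaters = False, cheaters_list = None):
--     """
--     Distinct-keys-then-gather: list the distinct (wanted) matches in first-occurrence
--     order, then build each key's index list with its own comprehension, instead of
--     appending to a growing defaultdict in one enumerate pass.
--     """
--     ms = dict["match"]
--     if cheaters == False: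
--         wanted = None
--     else:
--         cheat = cheaters_list if type(cheaters_list) == set else set(cheaters_list)
--         wanted = {m for u, m in zip(dict["killer"], ms) if u in cheat}
--     keys = []
--     for k in ms:
--         if (wanted is None or k in wanted) and k not in keys:
--             keys.append(k)
--     out = collections.defaultdict(list)
--     for k in keys:
--         out[k] = [i for i, m in enumerate(ms) if m == k]
--     return out
-- ===== Notes on version B (the rewrite author's own statement) =====
-- stated objective: alternative
-- what changed: B first computes the distinct (wanted) match keys in first-occurrence order and then gathers each key's index list with its own scan/comprehension, and finds cheating matches by zipping killer with match, instead of A's single enumerate pass that appends into a growing defaultdict per branch.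
-- outside the precondition, e.g. on get_match_indices_dict({}, False, None): A raises KeyError, B raises KeyError
import Mathlib
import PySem

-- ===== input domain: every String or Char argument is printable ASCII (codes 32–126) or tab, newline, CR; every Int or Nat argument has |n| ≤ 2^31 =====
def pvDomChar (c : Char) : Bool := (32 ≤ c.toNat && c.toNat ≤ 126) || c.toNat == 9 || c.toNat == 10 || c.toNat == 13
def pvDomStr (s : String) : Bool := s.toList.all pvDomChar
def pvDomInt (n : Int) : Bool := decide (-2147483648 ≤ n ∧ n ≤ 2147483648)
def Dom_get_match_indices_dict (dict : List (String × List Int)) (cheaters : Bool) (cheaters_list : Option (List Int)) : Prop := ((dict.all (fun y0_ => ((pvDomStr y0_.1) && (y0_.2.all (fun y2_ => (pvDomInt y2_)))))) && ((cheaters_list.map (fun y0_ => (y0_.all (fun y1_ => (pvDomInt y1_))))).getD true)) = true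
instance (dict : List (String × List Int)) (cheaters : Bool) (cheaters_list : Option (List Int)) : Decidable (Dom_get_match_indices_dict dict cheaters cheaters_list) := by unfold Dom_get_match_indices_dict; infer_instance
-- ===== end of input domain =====

-- B lists the distinct (wanted) match keys first and then gathers each key's index list with
-- its own scan (distinct-keys-then-gather), instead of A's single enumerate pass appending
-- into a growing defaultdict per branch. Equivalence is about the RETURN value.

-- ===== PORT A =====
def get_match_indices_dict (dict : List (String × List Int)) (cheaters : Bool) (cheaters_list : Option (List Int)) : List (Int × List Int) :=
  if cheaters = false then
    -- dict["match"] : first-match lookup; KeyError (none) excluded by Pre_, getD [] is never taken there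
    let ms := ((PySem.Dict.mk dict).get? "match").getD []
    ((PySem.List.enumerate ms).foldl
      (fun d p => d.modify p.2 [] (fun v => v ++ [p.1])) PySem.Dict.empty).items
  else
    -- set(cheaters_list): TypeError on None is excluded by Pre_ (getD [] never taken inside Pre_)
    let cl : PySem.Set Int := PySem.Set.ofList (cheaters_list.getD [])
    let ms := ((PySem.Dict.mk dict).get? "match").getD []
    let ks := ((PySem.Dict.mk dict).get? "killer").getD []
    -- dict["match"][index] : IndexError excluded by Pre_, so pyGetD's default 0 is never taken
    let cheating : PySem.Set Int :=
      (PySem.List.enumerate ks).foldl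
        (fun s p => if PySem.Set.contains cl p.2 then PySem.Set.add s (PySem.List.pyGetD ms p.1 0) else s)
        PySem.Set.empty
    ((PySem.List.enumerate ms).foldl
      (fun d p => if PySem.Set.contains cheating p.2 then d.modify p.2 [] (fun v => v ++ [p.1]) else d)
      PySem.Dict.empty).items

-- ===== PORT B =====
def get_match_indices_dict_alt (dict : List (String × List Int)) (cheaters : Bool) (cheaters_list : Option (List Int)) : List (Int × List Int) :=
  let ms := ((PySem.Dict.mk dict).get? "match").getD []
  -- wanted: none in the plain mode; in cheaters mode the set {m for u, m in zip(killer, match) if u in cheat}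
  let wanted : Option (PySem.Set Int) :=
    if cheaters = false then none
    else
      let cheat : PySem.Set Int := PySem.Set.ofList (cheaters_list.getD [])
      some ((List.zip (((PySem.Dict.mk dict).get? "killer").getD []) ms).foldl
        (fun s p => if PySem.Set.contains cheat p.1 then PySem.Set.add s p.2 else s) PySem.Set.empty)
  -- keys: distinct wanted matches in first-occurrence order
  let keys : List Int := ms.foldl (fun acc k =>
      if (match wanted with | none => true | some w => PySem.Set.contains w k) && !(acc.contains k)
      then acc ++ [k] else acc) []
  -- out[k] = [i for i, m in enumerate(ms) if m == k]
  (keys.foldl (fun out k =>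
      out.insert k (((PySem.List.enumerate ms).filter (fun p => p.2 == k)).map (fun p => p.1)))
    PySem.Dict.empty).items

-- ===== PRECONDITION & SPEC =====
-- Pre_ excludes exactly the inputs where the Python A raises: missing "match" key (KeyError);
-- and, when cheaters is true: cheaters_list = None (TypeError in set(None)), missing "killer"
-- key (KeyError), or a cheating killer at an index beyond len(dict["match"]) (IndexError).
def Pre_get_match_indices_dict (dict : List (String × List Int)) (cheaters : Bool) (cheaters_list : Option (List Int)) : Prop :=
  (PySem.Dict.mk dict).contains "match" = true ∧
  (cheaters = true →
    cheaters_list ≠ none ∧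
    (PySem.Dict.mk dict).contains "killer" = true ∧
    ∀ p ∈ PySem.List.enumerate (((PySem.Dict.mk dict).get? "killer").getD []),
      p.2 ∈ cheaters_list.getD [] →
        p.1 < ((((PySem.Dict.mk dict).get? "match").getD []).length : Int))
instance (dict : List (String × List Int)) (cheaters : Bool) (cheaters_list : Option (List Int)) : Decidable (Pre_get_match_indices_dict dict cheaters cheaters_list) := by unfold Pre_get_match_indices_dict; infer_instance

def pvWitness_get_match_indices_dict : (List (String × List Int)) × Bool × Option (List Int) :=
  ([("match", [5, 6, 5, 7]), ("killer", [1, 2, 3, 4])], true, some [1, 3])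

def Spec_get_match_indices_dict (dict : List (String × List Int)) (cheaters : Bool) (cheaters_list : Option (List Int)) (out : List (Int × List Int)) : Prop := out = get_match_indices_dict_alt dict cheaters cheaters_list
instance (dict : List (String × List Int)) (cheaters : Bool) (cheaters_list : Option (List Int)) (out : List (Int × List Int)) : Decidable (Spec_get_match_indices_dict dict cheaters cheaters_list out) := by unfold Spec_get_match_indices_dict; infer_instance

-- ===== CLAIM (what is proved, stated in full; the proofs are below) =====
def Claim_equal_get_match_indices_dict : Prop := ∀ (dict : List (String × List Int)) (cheaters : Bool) (cheaters_list : Option (List Int)), Dom_get_match_indices_dict dict cheaters cheaters_list → Pre_get_match_indices_dict dict cheaters cheaters_list → Spec_get_match_indices_dict dict cheaters cheaters_list (get_match_indices_dict dict cheaters cheaters_list)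

-- ===== LEMMAS AND PROOFS =====


-- membership in a zip, by index
theorem pv_mem_zip {α β : Type} (l : List α) (l' : List β) (p : α × β) :
    p ∈ List.zip l l' ↔ ∃ i : Nat, l[i]? = some p.1 ∧ l'[i]? = some p.2 := by
  induction l generalizing l' with
  | nil => simp
  | cons x xs ih =>
    cases l' with
    | nil => simp
    | cons y ys =>
      simp only [List.zip_cons_cons, List.mem_cons, ih]
      constructor
      · rintro (h | ⟨i, h1, h2⟩)
        · exact ⟨0, by simp [h]⟩
        · exact ⟨i + 1, by simpa using h1, by simpa using h2⟩
      · rintro ⟨i, h1, h2⟩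
        cases i with
        | zero => left; simp at h1 h2; cases p; simp [h1, h2]
        | succ j => right; exact ⟨j, by simpa using h1, by simpa using h2⟩

-- membership in enumerate, by index
theorem pv_mem_enumerate {α : Type} (xs : List α) (s : Int) (p : Int × α) :
    p ∈ PySem.List.enumerate xs s ↔ ∃ i : Nat, p.1 = s + i ∧ xs[i]? = some p.2 := by
  induction xs generalizing s with
  | nil => simp [PySem.List.enumerate_nil]
  | cons x xs ih =>
    simp only [PySem.List.enumerate_cons, List.mem_cons, ih]
    constructor
    · rintro (h | ⟨i, h1, h2⟩)
      · exact ⟨0, by simp [h], by simp [h]⟩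
      · exact ⟨i + 1, by push_cast at h1 ⊢; omega, by simpa using h2⟩
    · rintro ⟨i, h1, h2⟩
      cases i with
      | zero => left; simp at h1 h2; cases p; simp_all
      | succ j => right; exact ⟨j, by push_cast at h1 ⊢; omega, by simpa using h2⟩

-- a fold that acts only when c holds is the fold over the filtered list
theorem pv_foldl_if {α β : Type} (c : α → Bool) (g : β → α → β) (l : List α) (init : β) :
    l.foldl (fun acc x => if c x then g acc x else acc) init = (l.filter c).foldl g init := by
  induction l generalizing init with
  | nil => rfl
  | cons x xs ih => by_cases h : c x = true <;> simp [h, ih]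

-- getD of the grouping fold, keyed on the second component
theorem pv_getD_group (l : List (Int × Int)) (k : Int) :
    (l.foldl (fun d p => d.modify p.2 [] (fun v => v ++ [p.1])) PySem.Dict.empty).getD k []
      = (l.filter (fun p => p.2 == k)).map (fun p => p.1) := by
  have h : l.foldl (fun d p => PySem.Dict.modify d p.2 [] (fun v => v ++ [p.1])) PySem.Dict.empty
      = (l.map Prod.swap).foldl (fun d p => PySem.Dict.modify d p.1 [] (fun v => v ++ [p.2])) PySem.Dict.empty := by
    rw [List.foldl_map]; rfl
  rw [h, PySem.Dict.getD_foldl_modify_append, List.filter_map, List.map_map]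
  simp [Function.comp_def, Prod.swap]

theorem pv_keys_group (l : List (Int × Int)) :
    (l.foldl (fun d p => d.modify p.2 [] (fun v => v ++ [p.1])) PySem.Dict.empty).keys
      = PySem.Set.ofList (l.map (fun p => p.2)) := by
  rw [PySem.Dict.keys_foldl_modify_key (key := fun p : Int × Int => p.2) (d0 := ([] : List Int))
      (f := fun _ p => fun v => v ++ [p.1]), PySem.Dict.keys_empty, PySem.Set.update_nil_left]

-- A's grouping fold, written as B writes it: one pair per distinct key, in first-occurrence order
theorem pv_group_items (ms : List Int) (P : Int → Bool) :
    ((PySem.List.enumerate ms).foldl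
        (fun d p => if P p.2 then d.modify p.2 [] (fun v => v ++ [p.1]) else d)
        PySem.Dict.empty).items
      = (PySem.Set.ofList (ms.filter P)).map
          (fun k => (k, ((PySem.List.enumerate ms).filter (fun p => p.2 == k)).map (fun p => p.1))) := by
  rw [pv_foldl_if (fun p : Int × Int => P p.2)
      (fun d p => PySem.Dict.modify d p.2 [] (fun v => v ++ [p.1])) (PySem.List.enumerate ms) PySem.Dict.empty]
  set l := (PySem.List.enumerate ms).filter (fun p => P p.2) with hl
  have nodupK : (l.foldl (fun d p => PySem.Dict.modify d p.2 [] (fun v => v ++ [p.1])) PySem.Dict.empty).keys.Nodup := by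
    apply PySem.Dict.nodup_keys_foldl_modify_key (key := fun p : Int × Int => p.2)
      (d0 := ([] : List Int)) (f := fun _ p => fun v => v ++ [p.1])
    simp [PySem.Dict.keys_empty]
  rw [PySem.Dict.items_eq_map_keys _ nodupK ([] : List Int), pv_keys_group]
  have hkeys : l.map (fun p => p.2) = ms.filter P := by
    rw [hl, show (fun p : Int × Int => P p.2) = P ∘ (fun p : Int × Int => p.2) from rfl,
      ← List.filter_map, PySem.List.map_snd_enumerate]
  rw [hkeys]
  apply List.map_congr_left
  intro k hk
  have hPk : P k = true := by
    have hmem : k ∈ ms.filter P := by simpa [pysem] using hk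
    exact (List.mem_filter.mp hmem).2
  rw [pv_getD_group, hl, List.filter_filter]
  congr 2
  apply List.filter_congr
  intro p _
  by_cases hpk : p.2 == k
  · have : p.2 = k := by simpa using hpk
    simp [this, hPk]
  · simp [hpk]

-- B's key loop computes set(filter wanted ms)
theorem pv_keys_loop (ms : List Int) (P : Int → Bool) :
    ms.foldl (fun acc k => if P k && !(acc.contains k) then acc ++ [k] else acc) []
      = PySem.Set.ofList (ms.filter P) := by
  have hbody : (fun (acc : List Int) (k : Int) => if P k && !(acc.contains k) then acc ++ [k] else acc)
      = (fun (acc : List Int) (k : Int) => if P k then PySem.Set.add acc k else acc) := by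
    funext acc k
    by_cases hp : P k = true
    · by_cases hm : k ∈ acc
      · simp [hp, hm]
      · simp [hp, hm]
    · simp [Bool.eq_false_iff.mpr hp]
  rw [hbody, pv_foldl_if P PySem.Set.add ms ([] : List Int), ← PySem.Set.ofList_eq_foldl]

-- B's items: fresh distinct keys append in order
theorem pv_items_fresh (ms keys : List Int) (hnd : keys.Nodup) :
    ((keys.foldl (fun out k =>
        out.insert k (((PySem.List.enumerate ms).filter (fun p => p.2 == k)).map (fun p => p.1)))
      PySem.Dict.empty)).items
      = keys.map (fun k => (k, ((PySem.List.enumerate ms).filter (fun p => p.2 == k)).map (fun p => p.1))) := by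
  rw [PySem.Dict.items_foldl_insert_fresh keys (fun k => k)
      (fun k => ((PySem.List.enumerate ms).filter (fun p => p.2 == k)).map (fun p => p.1))
      PySem.Dict.empty (fun a _ => PySem.Dict.contains_empty a) (by simpa using hnd)]
  simp [show PySem.Dict.empty.items = [] from rfl]

-- same members in A's cheating set (enumerate + index) and B's (zip), under Pre_'s index bound
theorem pv_cheating_mem (cl : PySem.Set Int) (ks ms : List Int)
    (hb : ∀ p ∈ PySem.List.enumerate ks, PySem.Set.contains cl p.2 = true → p.1 < (ms.length : Int)) (k : Int) :
    (k ∈ (PySem.List.enumerate ks).foldl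
        (fun s p => if PySem.Set.contains cl p.2 then PySem.Set.add s (PySem.List.pyGetD ms p.1 0) else s)
        PySem.Set.empty)
      ↔ (k ∈ (List.zip ks ms).foldl
        (fun s p => if PySem.Set.contains cl p.1 then PySem.Set.add s p.2 else s) PySem.Set.empty) := by
  rw [pv_foldl_if (fun p : Int × Int => PySem.Set.contains cl p.2)
      (fun s p => PySem.Set.add s (PySem.List.pyGetD ms p.1 0)) (PySem.List.enumerate ks) PySem.Set.empty,
    pv_foldl_if (fun p : Int × Int => PySem.Set.contains cl p.1)
      (fun s p => PySem.Set.add s p.2) (List.zip ks ms) PySem.Set.empty,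
    show (fun (s : PySem.Set Int) (p : Int × Int) => PySem.Set.add s (PySem.List.pyGetD ms p.1 0))
      = (fun (s : PySem.Set Int) (p : Int × Int) => PySem.Set.add s ((fun q : Int × Int => PySem.List.pyGetD ms q.1 0) p)) from rfl,
    show (fun (s : PySem.Set Int) (p : Int × Int) => PySem.Set.add s p.2)
      = (fun (s : PySem.Set Int) (p : Int × Int) => PySem.Set.add s ((fun q : Int × Int => q.2) p)) from rfl,
    PySem.Set.mem_foldl_add, PySem.Set.mem_foldl_add]
  simp only [PySem.Set.empty, List.not_mem_nil, false_or, List.mem_filter]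
  constructor
  · rintro ⟨p, ⟨hpmem, hcl⟩, hk⟩
    obtain ⟨i, hi1, hi2⟩ := (pv_mem_enumerate ks 0 p).mp hpmem
    have hbound : p.1 < (ms.length : Int) := hb p hpmem hcl
    have hilt : i < ms.length := by omega
    refine ⟨(p.2, ms[i]), ⟨(pv_mem_zip ks ms _).mpr ⟨i, by simpa using hi2, by simp [hilt]⟩, hcl⟩, ?_⟩
    rw [hk, hi1]
    simp [PySem.List.pyGetD_natCast, List.getD_eq_getElem?_getD, hilt]
  · rintro ⟨q, ⟨hqmem, hcl⟩, hk⟩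
    obtain ⟨i, hi1, hi2⟩ := (pv_mem_zip ks ms q).mp hqmem
    refine ⟨((i : Int), q.1), ⟨(pv_mem_enumerate ks 0 _).mpr ⟨i, by simp, by simpa using hi1⟩, hcl⟩, ?_⟩
    rw [hk]
    simp [PySem.List.pyGetD_natCast, List.getD_eq_getElem?_getD, hi2]

-- ===== VERDICT (by name: the statement is the Claim_ definition above) =====
theorem get_match_indices_dict_spec : Claim_equal_get_match_indices_dict := by
  intro dict cheaters cheaters_list _ hpre
  unfold Spec_get_match_indices_dict
  cases cheaters with
  | false =>
    show (((PySem.List.enumerate (((PySem.Dict.mk dict).get? "match").getD [])).foldl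
        (fun d p => if (fun _ : Int => true) p.2 then d.modify p.2 [] (fun v => v ++ [p.1]) else d)
        PySem.Dict.empty).items)
      = (((((PySem.Dict.mk dict).get? "match").getD []).foldl
          (fun acc k => if (fun _ : Int => true) k && !(acc.contains k) then acc ++ [k] else acc) []).foldl
          (fun out k => out.insert k
            (((PySem.List.enumerate (((PySem.Dict.mk dict).get? "match").getD [])).filter
              (fun p => p.2 == k)).map (fun p => p.1)))
          PySem.Dict.empty).items
    rw [pv_group_items (((PySem.Dict.mk dict).get? "match").getD []) (fun _ => true),
      pv_keys_loop (((PySem.Dict.mk dict).get? "match").getD []) (fun _ => true),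
      pv_items_fresh _ _ (PySem.Set.nodup_ofList _)]
  | true =>
    obtain ⟨-, hrest⟩ := hpre
    obtain ⟨-, -, hidx⟩ := hrest rfl
    set ms := ((PySem.Dict.mk dict).get? "match").getD [] with hms
    set ks := ((PySem.Dict.mk dict).get? "killer").getD [] with hks
    set cl : PySem.Set Int := PySem.Set.ofList (cheaters_list.getD []) with hcl
    set SA := (PySem.List.enumerate ks).foldl
        (fun s p => if PySem.Set.contains cl p.2 then PySem.Set.add s (PySem.List.pyGetD ms p.1 0) else s)
        PySem.Set.empty with hSA
    set SB := (List.zip ks ms).foldl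
        (fun s p => if PySem.Set.contains cl p.1 then PySem.Set.add s p.2 else s) PySem.Set.empty with hSB
    have hb : ∀ p ∈ PySem.List.enumerate ks, PySem.Set.contains cl p.2 = true → p.1 < (ms.length : Int) := by
      intro p hp hc
      exact hidx p hp (by simpa [hcl, pysem] using hc)
    have hAB : ∀ k, PySem.Set.contains SA k = PySem.Set.contains SB k := by
      intro k
      have h := pv_cheating_mem cl ks ms hb k
      rw [← hSA, ← hSB] at h
      by_cases h1 : k ∈ SA
      · rw [(PySem.Set.contains_iff _ _).mpr h1, (PySem.Set.contains_iff _ _).mpr (h.mp h1)]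
      · have h2 : k ∉ SB := fun hx => h1 (h.mpr hx)
        rw [Bool.eq_false_iff.mpr (fun hx => h1 ((PySem.Set.contains_iff _ _).mp hx)),
          Bool.eq_false_iff.mpr (fun hx => h2 ((PySem.Set.contains_iff _ _).mp hx))]
    show (((PySem.List.enumerate ms).foldl
        (fun d p => if (fun k => PySem.Set.contains SA k) p.2 then d.modify p.2 [] (fun v => v ++ [p.1]) else d)
        PySem.Dict.empty).items)
      = ((ms.foldl
          (fun acc k => if (fun k' => PySem.Set.contains SB k') k && !(acc.contains k) then acc ++ [k] else acc) []).foldl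
          (fun out k => out.insert k
            (((PySem.List.enumerate ms).filter (fun p => p.2 == k)).map (fun p => p.1)))
          PySem.Dict.empty).items
    rw [pv_group_items ms (fun k => PySem.Set.contains SA k),
      pv_keys_loop ms (fun k' => PySem.Set.contains SB k'),
      pv_items_fresh _ _ (PySem.Set.nodup_ofList _)]
    have hfilter : ms.filter (fun k => PySem.Set.contains SA k) = ms.filter (fun k => PySem.Set.contains SB k) :=
      List.filter_congr (fun k _ => hAB k)
    rw [hfilter]
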